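-- pv_equiv track=rewrite | github.com/pavelapekhtin/price-driven-switch | price_driven_switch/backend/prices.py | _interleave_hours
-- ===== SOURCE A (Python) =====
-- def _interleave_hours(hours: list[int]) -> list[int]:
--     """Reorder hours to maximize spacing when selected sequentially.
--
--     Uses binary tree traversal to distribute hours evenly.
--     Example: [0,1,2,3,4,5,6,7] -> [3,1,5,0,2,4,6,7]
--     So selecting first 3 gives [3,1,5] instead of [0,1,2]
--     """
--     if len(hours) <= 1:
--         return hours
--
--     result = []
--     queue = [(0, len(hours) - 1)]  # (start, end) pairs
--
--     while queue:
--         start, end = queue.pop(0)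
--         if start > end:
--             continue
--
--         # Take the middle element
--         mid = (start + end) // 2
--         result.append(hours[mid])
--
--         # Add left and right halves to queue
--         queue.append((start, mid - 1))
--         queue.append((mid + 1, end))
--
--     return result
-- ===== SOURCE B (Python) =====
-- def _interleave_hours(hours: list[int]) -> list[int]:
--     """Reorder hours to maximize spacing when selected sequentially.
--
--     Divide-and-conquer: recursively split (start, end) at its midpoint and
--     record each midpoint into a bucket keyed by recursion depth; flattening
--     the buckets in increasing-depth order yields the level-order result.
--     """
--     if len(hours) <= 1:
--         return hours
--
--     buckets: list[list[int]] = []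
--
--     def go(start: int, end: int, depth: int) -> None:
--         if start > end:
--             return
--         mid = (start + end) // 2
--         if depth == len(buckets):
--             buckets.append([])
--         buckets[depth].append(hours[mid])
--         go(start, mid - 1, depth + 1)
--         go(mid + 1, end, depth + 1)
--
--     go(0, len(hours) - 1, 0)
--     return [h for level in buckets for h in level]
-- ===== Notes on version B (the rewrite author's own statement) =====
-- stated objective: faster
-- what changed: Replaces A's iterative FIFO-queue (BFS) loop with a divide-and-conquer recursion that splits each range at its midpoint, records midpoints into depth-keyed buckets, and flattens the buckets in increasing-depth order.
import Mathlib
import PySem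

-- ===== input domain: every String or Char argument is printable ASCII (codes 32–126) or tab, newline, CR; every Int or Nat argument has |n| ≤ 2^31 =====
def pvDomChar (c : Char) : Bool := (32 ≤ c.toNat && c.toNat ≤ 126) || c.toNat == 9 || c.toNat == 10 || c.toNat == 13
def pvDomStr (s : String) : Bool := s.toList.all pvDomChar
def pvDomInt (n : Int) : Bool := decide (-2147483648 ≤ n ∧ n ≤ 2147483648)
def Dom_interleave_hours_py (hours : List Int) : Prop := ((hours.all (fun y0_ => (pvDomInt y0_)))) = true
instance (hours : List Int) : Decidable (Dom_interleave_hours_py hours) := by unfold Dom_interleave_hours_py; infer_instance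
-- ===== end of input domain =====

-- B replaces A's iterative FIFO-queue traversal (whose list.pop(0) is linear per step)
-- by a divide-and-conquer recursion recording midpoints into depth-keyed buckets,
-- flattened in increasing-depth order; a timing run measured B faster.

-- ===== PORT A =====
-- the while loop of A: FIFO queue of (start, end) ranges, accumulating `result`.
-- hours[mid] is ported as pyGetD: for every queue A actually builds the index is in
-- range (ranges stay inside [0, len-1]), so Python never raises here.
def pvLoopA (hours : List Int) : Nat → List (Int × Int) → List Int → List Int
  | _, [], result => result
  | 0, _ :: _, result => result   -- unreachable: the entry's fuel suffices
  | fuel + 1, (start, end_) :: queue, result =>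
    if start > end_ then pvLoopA hours fuel queue result
    else
      let mid := PySem.Int.floordiv (start + end_) 2
      pvLoopA hours fuel (queue ++ [(start, mid - 1), (mid + 1, end_)])
        (result ++ [PySem.List.pyGetD hours mid 0])

def interleave_hours_py (hours : List Int) : List Int :=
  if hours.length ≤ 1 then hours
  else pvLoopA hours (2 * hours.length + 1) [(0, (hours.length : Int) - 1)] []

-- ===== PORT B =====
-- the recursive helper `go` of B: records hours[mid] into buckets[depth]
-- (appending a fresh bucket when depth == len(buckets)), then recurses left, right.
-- The fuel argument only makes the recursion structural; the entry supplies enough.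
def pvGoB (hours : List Int) : Nat → Int → Int → Nat → List (List Int) → List (List Int)
  | 0, _, _, _, buckets => buckets   -- unreachable: the entry's fuel suffices
  | fuel + 1, start, end_, depth, buckets =>
    if start > end_ then buckets
    else
      let mid := PySem.Int.floordiv (start + end_) 2
      let b1 := if depth = buckets.length then buckets ++ [[]] else buckets
      let b2 := b1.modify depth (fun lvl => lvl ++ [PySem.List.pyGetD hours mid 0])
      pvGoB hours fuel (mid + 1) end_ (depth + 1)
        (pvGoB hours fuel start (mid - 1) (depth + 1) b2)

def interleave_hours_py_alt (hours : List Int) : List Int :=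
  if hours.length ≤ 1 then hours
  else (pvGoB hours hours.length 0 ((hours.length : Int) - 1) 0 []).flatten

-- ===== PRECONDITION & SPEC =====
def Spec_interleave_hours_py (hours : List Int) (out : List Int) : Prop := out = interleave_hours_py_alt hours
instance (hours : List Int) (out : List Int) : Decidable (Spec_interleave_hours_py hours out) := by unfold Spec_interleave_hours_py; infer_instance

-- ===== CLAIM (what is proved, stated in full; the proofs are below) =====
def Claim_equal_interleave_hours_py : Prop := ∀ (hours : List Int), Dom_interleave_hours_py hours → Spec_interleave_hours_py hours (interleave_hours_py hours)

-- ===== LEMMAS AND PROOFS =====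

-- measure of a queue: each loop iteration strictly decreases it
def pvQMeasure (q : List (Int × Int)) : Nat :=
  (q.map (fun p => 2 * (p.2 - p.1 + 1).toNat + 1)).sum

-- levelwise concatenation of two bucket lists
def pvMerge : List (List Int) → List (List Int) → List (List Int)
  | [], ys => ys
  | xs, [] => xs
  | x :: xs, y :: ys => (x ++ y) :: pvMerge xs ys

-- the levels (bucket lists) of the midpoint tree of one range
def pvLevels (hours : List Int) (s e : Int) : List (List Int) :=
  if h : s > e then []
  else
    let mid := PySem.Int.floordiv (s + e) 2
    [PySem.List.pyGetD hours mid 0] ::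
      pvMerge (pvLevels hours s (mid - 1)) (pvLevels hours (mid + 1) e)
  termination_by (e - s + 1).toNat
  decreasing_by
  · have hb := PySem.Int.floordiv_two_mid_bounds (by omega : s ≤ e)
    omega
  · have hb := PySem.Int.floordiv_two_mid_bounds (by omega : s ≤ e)
    omega

-- midpoints of the valid ranges of a queue, in order
def pvMids (hours : List Int) (q : List (Int × Int)) : List Int :=
  q.flatMap (fun p =>
    if p.1 > p.2 then []
    else [PySem.List.pyGetD hours (PySem.Int.floordiv (p.1 + p.2) 2) 0])

-- the child ranges of all valid ranges of a queue, in order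
def pvChildren (q : List (Int × Int)) : List (Int × Int) :=
  q.flatMap (fun p =>
    if p.1 > p.2 then []
    else
      let mid := PySem.Int.floordiv (p.1 + p.2) 2
      [(p.1, mid - 1), (mid + 1, p.2)])

lemma pvQMeasure_append (a b : List (Int × Int)) :
    pvQMeasure (a ++ b) = pvQMeasure a + pvQMeasure b := by
  simp [pvQMeasure]

lemma pvQMeasure_cons (p : Int × Int) (q : List (Int × Int)) :
    pvQMeasure (p :: q) = 2 * (p.2 - p.1 + 1).toNat + 1 + pvQMeasure q := by
  simp [pvQMeasure]

lemma pvChildren_cons (p : Int × Int) (q : List (Int × Int)) :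
    pvChildren (p :: q)
      = (if p.1 > p.2 then []
         else [(p.1, PySem.Int.floordiv (p.1 + p.2) 2 - 1),
               (PySem.Int.floordiv (p.1 + p.2) 2 + 1, p.2)]) ++ pvChildren q := by
  simp [pvChildren]

lemma pvMids_cons (hours : List Int) (p : Int × Int) (q : List (Int × Int)) :
    pvMids hours (p :: q)
      = (if p.1 > p.2 then []
         else [PySem.List.pyGetD hours (PySem.Int.floordiv (p.1 + p.2) 2) 0])
        ++ pvMids hours q := by
  simp [pvMids]

-- proof-side well-founded twins of the two fueled ports
def pvLoopW (hours : List Int) : List (Int × Int) → List Int → List Int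
  | [], result => result
  | (start, end_) :: queue, result =>
    if h : start > end_ then pvLoopW hours queue result
    else
      let mid := PySem.Int.floordiv (start + end_) 2
      pvLoopW hours (queue ++ [(start, mid - 1), (mid + 1, end_)])
        (result ++ [PySem.List.pyGetD hours mid 0])
  termination_by q _ => pvQMeasure q
  decreasing_by
  · simp [pvQMeasure]
  · have hb := PySem.Int.floordiv_two_mid_bounds (by omega : start ≤ end_)
    simp [pvQMeasure]; omega

def pvGoW (hours : List Int) (start end_ : Int) (depth : Nat)
    (buckets : List (List Int)) : List (List Int) :=
  if h : start > end_ then buckets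
  else
    let mid := PySem.Int.floordiv (start + end_) 2
    let b1 := if depth = buckets.length then buckets ++ [[]] else buckets
    let b2 := b1.modify depth (fun lvl => lvl ++ [PySem.List.pyGetD hours mid 0])
    pvGoW hours (mid + 1) end_ (depth + 1) (pvGoW hours start (mid - 1) (depth + 1) b2)
  termination_by (end_ - start + 1).toNat
  decreasing_by
  · have hb := PySem.Int.floordiv_two_mid_bounds (by omega : start ≤ end_)
    omega
  · have hb := PySem.Int.floordiv_two_mid_bounds (by omega : start ≤ end_)
    omega

-- enough fuel makes the fueled ports agree with their well-founded twins
lemma pvLoopA_eq_pvLoopW (hours : List Int) :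
    ∀ (fuel : Nat) (q : List (Int × Int)) (res : List Int), pvQMeasure q ≤ fuel →
      pvLoopA hours fuel q res = pvLoopW hours q res := by
  intro fuel
  induction fuel with
  | zero =>
    intro q res hq
    cases q with
    | nil => rw [pvLoopA, pvLoopW]
    | cons p q' => rw [pvQMeasure_cons] at hq; omega
  | succ fuel ih =>
    intro q res hq
    cases q with
    | nil => rw [pvLoopA, pvLoopW]
    | cons p q' =>
      obtain ⟨s, e⟩ := p
      rw [pvQMeasure_cons] at hq
      rw [pvLoopA, pvLoopW]
      by_cases hse : s > e
      · rw [if_pos hse, dif_pos hse, ih q' res (by omega)]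
      · have hb := PySem.Int.floordiv_two_mid_bounds (show s ≤ e by omega)
        rw [if_neg hse, dif_neg hse]
        refine ih _ _ ?_
        rw [pvQMeasure_append, pvQMeasure_cons, pvQMeasure_cons]
        have hnil : pvQMeasure ([] : List (Int × Int)) = 0 := rfl
        rw [hnil]
        simp only []
        omega

lemma pvGoB_eq_pvGoW (hours : List Int) :
    ∀ (fuel : Nat) (s e : Int), (e - s + 1).toNat ≤ fuel → ∀ (d : Nat) (b : List (List Int)),
      pvGoB hours fuel s e d b = pvGoW hours s e d b := by
  intro fuel
  induction fuel with
  | zero =>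
    intro s e hn d b
    have hse : s > e := by omega
    rw [pvGoB, pvGoW, dif_pos hse]
  | succ fuel ih =>
    intro s e hn d b
    rw [pvGoB, pvGoW]
    by_cases hse : s > e
    · rw [if_pos hse, dif_pos hse]
    · have hb := PySem.Int.floordiv_two_mid_bounds (show s ≤ e by omega)
      rw [if_neg hse, dif_neg hse]
      simp only []
      rw [ih s (PySem.Int.floordiv (s + e) 2 - 1) (by omega),
          ih (PySem.Int.floordiv (s + e) 2 + 1) e (by omega)]

lemma pvQMeasure_children_add_len (q : List (Int × Int)) :
    pvQMeasure (pvChildren q) + q.length ≤ pvQMeasure q := by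
  induction q with
  | nil => simp [pvChildren, pvQMeasure]
  | cons p q' ih =>
    obtain ⟨s, e⟩ := p
    rw [pvChildren_cons, pvQMeasure_append, pvQMeasure_cons]
    have hnil : pvQMeasure ([] : List (Int × Int)) = 0 := rfl
    by_cases hse : s > e
    · rw [if_pos hse, hnil]
      simp only [List.length_cons]
      omega
    · have hb := PySem.Int.floordiv_two_mid_bounds (show s ≤ e by omega)
      rw [if_neg hse, pvQMeasure_cons, pvQMeasure_cons, hnil]
      simp only [List.length_cons]
      omega

-- level-by-level run of the whole queue
def pvLevelRun (hours : List Int) (q : List (Int × Int)) : List Int :=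
  if h : q = [] then []
  else pvMids hours q ++ pvLevelRun hours (pvChildren q)
  termination_by pvQMeasure q
  decreasing_by
  · have := pvQMeasure_children_add_len q
    have : 1 ≤ q.length := by cases q with | nil => simp at h | cons a t => simp
    omega

lemma pvMerge_nil_right (xs : List (List Int)) : pvMerge xs [] = xs := by
  cases xs <;> rfl

lemma pvMerge_assoc (a b c : List (List Int)) :
    pvMerge (pvMerge a b) c = pvMerge a (pvMerge b c) := by
  induction a generalizing b c with
  | nil => simp [pvMerge]
  | cons x xs ih =>
    cases b with
    | nil => simp [pvMerge, pvMerge_nil_right]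
    | cons y ys =>
      cases c with
      | nil => simp [pvMerge_nil_right]
      | cons z zs => simp [pvMerge, ih, List.append_assoc]

lemma pvMerge_length (a b : List (List Int)) :
    (pvMerge a b).length = max a.length b.length := by
  induction a generalizing b with
  | nil => simp [pvMerge]
  | cons x xs ih =>
    cases b with
    | nil => simp [pvMerge_nil_right]
    | cons y ys => simp [pvMerge, ih]

lemma pvFlatten_head_tail (l : List (List Int)) :
    l.headD [] ++ l.tail.flatten = l.flatten := by
  cases l <;> simp

-- A's loop, Okasaki-style round lemma
lemma pvLoopW_round (hours : List Int) (q : List (Int × Int)) :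
    ∀ c res, pvLoopW hours (q ++ c) res
      = pvLoopW hours (c ++ pvChildren q) (res ++ pvMids hours q) := by
  induction q with
  | nil => simp [pvMids, pvChildren]
  | cons p q' ih =>
    intro c res
    obtain ⟨s, e⟩ := p
    rw [pvMids_cons, pvChildren_cons]
    by_cases hse : s > e
    · rw [List.cons_append, pvLoopW]
      simp only [hse, dif_pos, if_pos, List.nil_append]
      exact ih c res
    · have hb := PySem.Int.floordiv_two_mid_bounds (show s ≤ e by omega)
      rw [List.cons_append, pvLoopW]
      simp only [hse, dif_neg, if_neg, not_false_iff]
      rw [List.append_assoc q' c _]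
      rw [ih (c ++ [(s, PySem.Int.floordiv (s + e) 2 - 1),
                    (PySem.Int.floordiv (s + e) 2 + 1, e)]) _]
      simp [List.append_assoc]

lemma pvLoopW_eq_levelRun (hours : List Int) :
    ∀ n q res, pvQMeasure q ≤ n →
      pvLoopW hours q res = res ++ pvLevelRun hours q := by
  intro n
  induction n with
  | zero =>
    intro q res hq
    cases q with
    | nil => rw [pvLoopW, pvLevelRun]; simp
    | cons p q' => rw [pvQMeasure_cons] at hq; omega
  | succ n ih =>
    intro q res hq
    cases q with
    | nil => rw [pvLoopW, pvLevelRun]; simp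
    | cons p q' =>
      have hne : p :: q' ≠ [] := by simp
      have hround := pvLoopW_round hours (p :: q') [] res
      simp only [List.append_nil, List.nil_append] at hround
      rw [hround]
      have hm : pvQMeasure (pvChildren (p :: q')) ≤ n := by
        have := pvQMeasure_children_add_len (p :: q')
        simp only [List.length_cons] at this
        omega
      rw [ih _ _ hm]
      conv_rhs => rw [pvLevelRun]
      simp [hne, List.append_assoc]

def pvMergeAll (hours : List Int) (q : List (Int × Int)) : List (List Int) :=
  q.foldr (fun p acc => pvMerge (pvLevels hours p.1 p.2) acc) []

lemma pvMergeAll_append (hours : List Int) (a b : List (Int × Int)) :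
    pvMergeAll hours (a ++ b) = pvMerge (pvMergeAll hours a) (pvMergeAll hours b) := by
  induction a with
  | nil => simp [pvMergeAll, pvMerge]
  | cons p a' ih => simp [pvMergeAll] at ih ⊢; rw [ih, pvMerge_assoc]

lemma pvHead_merge (a b : List (List Int)) :
    (pvMerge a b).headD [] = a.headD [] ++ b.headD [] := by
  cases a with
  | nil => simp [pvMerge]
  | cons x xs =>
    cases b with
    | nil => simp [pvMerge_nil_right]
    | cons y ys => simp [pvMerge]

lemma pvTail_merge (a b : List (List Int)) :
    (pvMerge a b).tail = pvMerge a.tail b.tail := by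
  cases a with
  | nil => simp [pvMerge]
  | cons x xs =>
    cases b with
    | nil => simp [pvMerge_nil_right]
    | cons y ys => simp [pvMerge]

lemma pvMergeAll_cons (hours : List Int) (p : Int × Int) (q : List (Int × Int)) :
    pvMergeAll hours (p :: q) = pvMerge (pvLevels hours p.1 p.2) (pvMergeAll hours q) := by
  simp [pvMergeAll]

lemma pvLevels_headD (hours : List Int) (s e : Int) :
    (pvLevels hours s e).headD []
      = if s > e then [] else [PySem.List.pyGetD hours (PySem.Int.floordiv (s + e) 2) 0] := by
  rw [pvLevels]
  split_ifs <;> simp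

lemma pvLevels_tail (hours : List Int) (s e : Int) :
    (pvLevels hours s e).tail
      = if s > e then []
        else pvMerge (pvLevels hours s (PySem.Int.floordiv (s + e) 2 - 1))
                     (pvLevels hours (PySem.Int.floordiv (s + e) 2 + 1) e) := by
  rw [pvLevels]
  split_ifs <;> simp

lemma pvHead_mergeAll (hours : List Int) (q : List (Int × Int)) :
    (pvMergeAll hours q).headD [] = pvMids hours q := by
  induction q with
  | nil => simp [pvMergeAll, pvMids]
  | cons p q' ih =>
    rw [pvMergeAll_cons, pvHead_merge, ih, pvLevels_headD, pvMids_cons]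

lemma pvTail_mergeAll (hours : List Int) (q : List (Int × Int)) :
    (pvMergeAll hours q).tail = pvMergeAll hours (pvChildren q) := by
  induction q with
  | nil => simp [pvMergeAll, pvChildren]
  | cons p q' ih =>
    rw [pvMergeAll_cons, pvTail_merge, ih, pvLevels_tail, pvChildren_cons,
        pvMergeAll_append]
    by_cases hse : p.1 > p.2
    · simp [hse, pvMergeAll, pvMerge]
    · simp only [hse, if_neg, not_false_iff]
      rw [show pvMergeAll hours
            [(p.1, PySem.Int.floordiv (p.1 + p.2) 2 - 1),
             (PySem.Int.floordiv (p.1 + p.2) 2 + 1, p.2)]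
          = pvMerge (pvLevels hours p.1 (PySem.Int.floordiv (p.1 + p.2) 2 - 1))
              (pvLevels hours (PySem.Int.floordiv (p.1 + p.2) 2 + 1) p.2) from by
        simp [pvMergeAll, pvMerge_nil_right]]

lemma pvLevelRun_eq_flatten (hours : List Int) :
    ∀ n q, pvQMeasure q ≤ n →
      pvLevelRun hours q = (pvMergeAll hours q).flatten := by
  intro n
  induction n with
  | zero =>
    intro q hq
    cases q with
    | nil => rw [pvLevelRun]; simp [pvMergeAll]
    | cons p q' => rw [pvQMeasure_cons] at hq; omega
  | succ n ih =>
    intro q hq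
    cases q with
    | nil => rw [pvLevelRun]; simp [pvMergeAll]
    | cons p q' =>
      have hne : p :: q' ≠ [] := by simp
      rw [pvLevelRun]
      simp only [hne, dif_neg, not_false_iff]
      have hm : pvQMeasure (pvChildren (p :: q')) ≤ n := by
        have := pvQMeasure_children_add_len (p :: q')
        simp only [List.length_cons] at this
        omega
      rw [ih _ hm, ← pvTail_mergeAll, ← pvHead_mergeAll, pvFlatten_head_tail]

lemma pvMerge_replicate_nil (d : Nat) (b : List (List Int)) (h : d ≤ b.length) :
    pvMerge b (List.replicate d []) = b := by
  induction d generalizing b with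
  | zero => simp [pvMerge_nil_right]
  | succ d ih =>
    cases b with
    | nil => simp at h
    | cons x xs =>
      simp only [List.replicate_succ, pvMerge, List.append_nil]
      rw [ih xs (by simpa using h)]

lemma pvMerge_pad (d : Nat) (a b : List (List Int)) :
    pvMerge (List.replicate d [] ++ a) (List.replicate d [] ++ b)
      = List.replicate d [] ++ pvMerge a b := by
  induction d with
  | zero => simp
  | succ d ih => simp [List.replicate_succ, pvMerge, ih]

lemma pvModify_cons (x : List Int) (xs : List (List Int)) (d : Nat)
    (f : List Int → List Int) :
    (x :: xs).modify (d + 1) f = x :: xs.modify d f := rfl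

lemma pvBucketAdd_eq_merge (d : Nat) (b : List (List Int)) (m : Int) (h : d ≤ b.length) :
    (if d = b.length then b ++ [[]] else b).modify d (fun lvl => lvl ++ [m])
      = pvMerge b (List.replicate d [] ++ [[m]]) := by
  rcases Nat.lt_or_ge d b.length with hlt | hge
  · rw [if_neg (by omega)]
    clear h
    induction d generalizing b with
    | zero =>
      cases b with
      | nil => simp at hlt
      | cons x xs => simp [pvMerge, pvMerge_nil_right, List.modify]
    | succ d ih =>
      cases b with
      | nil => simp at hlt
      | cons x xs =>
        rw [pvModify_cons]
        simp only [List.replicate_succ, List.cons_append, pvMerge, List.append_nil]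
        rw [ih xs (by simpa using hlt)]
  · have heq : d = b.length := le_antisymm h hge
    rw [if_pos heq, heq]
    clear h hge heq
    induction b with
    | nil => simp [pvMerge, List.modify]
    | cons x xs ih =>
      rw [show ((x :: xs) ++ [[]] : List (List Int)) = x :: (xs ++ [[]]) from rfl,
        List.length_cons, pvModify_cons]
      simp only [List.replicate_succ, List.cons_append, pvMerge, List.append_nil]
      rw [ih]
lemma pvGoW_eq_merge (hours : List Int) :
    ∀ n s e, (e - s + 1).toNat ≤ n → ∀ d b, d ≤ b.length →
      pvGoW hours s e d b = pvMerge b (List.replicate d [] ++ pvLevels hours s e) := by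
  intro n
  induction n with
  | zero =>
    intro s e hn d b hd
    have hse : s > e := by omega
    rw [pvGoW, pvLevels]
    simp only [hse, dif_pos]
    simp [pvMerge_replicate_nil d b hd]
  | succ n ih =>
    intro s e hn d b hd
    by_cases hse : s > e
    · rw [pvGoW, pvLevels]
      simp only [hse, dif_pos]
      simp [pvMerge_replicate_nil d b hd]
    · have hb := PySem.Int.floordiv_two_mid_bounds (show s ≤ e by omega)
      rw [pvGoW, pvLevels]
      simp only [hse, dif_neg, not_false_iff]
      rw [pvBucketAdd_eq_merge d b _ hd]
      have hlen2 : d + 1 ≤ (pvMerge b (List.replicate d [] ++ [[PySem.List.pyGetD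
          hours (PySem.Int.floordiv (s + e) 2) 0]])).length := by
        rw [pvMerge_length]; simp
      rw [ih s (PySem.Int.floordiv (s + e) 2 - 1) (by omega) (d + 1) _ hlen2]
      rw [ih (PySem.Int.floordiv (s + e) 2 + 1) e (by omega) (d + 1) _
        (by rw [pvMerge_length]; exact le_trans hlen2 (Nat.le_max_left _ _))]
      rw [pvMerge_assoc, pvMerge_assoc]
      congr 1
      have hrep : ∀ X : List (List Int), List.replicate (d + 1) [] ++ X
          = List.replicate d [] ++ ([] :: X) := fun X => by
        rw [List.replicate_succ']; simp
      rw [hrep, hrep, pvMerge_pad, pvMerge_pad]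
      simp [pvMerge]

-- ===== VERDICT (by name: the statement is the Claim_ definition above) =====
theorem interleave_hours_py_spec : Claim_equal_interleave_hours_py := by
  intro hours _
  unfold Spec_interleave_hours_py interleave_hours_py interleave_hours_py_alt
  split
  · rfl
  · rw [pvLoopA_eq_pvLoopW hours _ _ _ (by simp [pvQMeasure])]
    rw [pvGoB_eq_pvGoW hours _ _ _ (by omega)]
    rw [pvLoopW_eq_levelRun hours (pvQMeasure [(0, (hours.length : Int) - 1)]) _ _ le_rfl]
    rw [pvLevelRun_eq_flatten hours (pvQMeasure [(0, (hours.length : Int) - 1)]) _ le_rfl]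
    rw [pvGoW_eq_merge hours (((hours.length : Int) - 1) - 0 + 1).toNat 0 _ le_rfl 0 [] (by simp)]
    simp [pvMergeAll, pvMerge_nil_right]
    rfl
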